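-- pv_equiv track=rewrite | github.com/placeforyiming/DeepReinforcementLearning | DQN/Train_Q.py | Deal_reward
-- ===== SOURCE A (Python) =====
-- def Deal_reward(gamma,Reward):
-- 		#Give all 0 reward the last one (+1 or -1)
-- 	count=len(Reward)
-- 	start=0
-- 	while count>0:
-- 		count=count-1
-- 		if Reward[count]!=0 :
-- 			start=Reward[count]
-- 			Base_count=count
-- 			continue
-- 		if start!=0 and Reward[count]==0:
-- 			#Reward[count]=gamma**(Base_count-count)*start
-- 			Reward[count]=start
--
-- 			continue
-- 	return Reward
-- ===== SOURCE B (Python) =====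
-- def Deal_reward(gamma, Reward):
--     # Forward pass: count zeros since the last nonzero; when a nonzero arrives,
--     # emit that many copies of it, then the value itself. Trailing zeros stay 0.
--     out = []
--     z = 0
--     for v in Reward:
--         if v != 0:
--             out.extend([v] * z)
--             out.append(v)
--             z = 0
--         else:
--             z += 1
--     out.extend([0] * z)
--     Reward[:] = out
--     return Reward
-- ===== Notes on version B (the rewrite author's own statement) =====
-- stated objective: alternative
-- what changed: A scans right-to-left writing the carried nonzero into each zero slot in place; B is a single forward pass that counts the run of zeros since the last nonzero and emits that many copies of the next nonzero (run-length style), building a fresh list assigned back into Reward.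
import Mathlib
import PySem

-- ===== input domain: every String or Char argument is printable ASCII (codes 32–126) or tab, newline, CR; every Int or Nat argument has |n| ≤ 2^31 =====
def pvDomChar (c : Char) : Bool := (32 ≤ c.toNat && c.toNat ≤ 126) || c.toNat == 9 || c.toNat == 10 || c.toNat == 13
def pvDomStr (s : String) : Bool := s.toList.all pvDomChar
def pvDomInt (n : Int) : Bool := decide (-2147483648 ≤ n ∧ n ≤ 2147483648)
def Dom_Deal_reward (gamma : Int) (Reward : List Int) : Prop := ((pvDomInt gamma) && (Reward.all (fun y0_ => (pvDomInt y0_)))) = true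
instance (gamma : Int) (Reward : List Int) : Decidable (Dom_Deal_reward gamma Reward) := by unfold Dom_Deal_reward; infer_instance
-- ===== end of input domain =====

-- B replaces A's right-to-left in-place carry loop by a single forward run-length pass. Both mutate Reward in place in Python; the theorems are about the returned value.

-- ===== PORT A =====
-- while count>0: count-=1; v := Reward[count]; if v≠0 set start; elif start≠0 write start
def dealA (start : Int) (count : Nat) (r : List Int) : List Int :=
  match count with
  | 0 => r
  | c + 1 =>
    let v := (PySem.List.pyGet? r (c : Int)).getD 0
    if v ≠ 0 then dealA v c r
    else if start ≠ 0 ∧ v = 0 then dealA start c (r.set c start)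
    else dealA start c r

def Deal_reward (gamma : Int) (Reward : List Int) : List Int :=
  dealA 0 Reward.length Reward

-- ===== PORT B =====
-- forward pass: out accumulates the result, z counts zeros since the last nonzero
def bLoop (out : List Int) (z : Nat) : List Int → List Int
  | [] => out ++ List.replicate z 0
  | v :: t =>
    if v ≠ 0 then bLoop (out ++ List.replicate z v ++ [v]) 0 t
    else bLoop out (z + 1) t

def Deal_reward_alt (gamma : Int) (Reward : List Int) : List Int :=
  bLoop [] 0 Reward

-- ===== PRECONDITION & SPEC =====
def Spec_Deal_reward (gamma : Int) (Reward : List Int) (out : List Int) : Prop := out = Deal_reward_alt gamma Reward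
instance (gamma : Int) (Reward : List Int) (out : List Int) : Decidable (Spec_Deal_reward gamma Reward out) := by unfold Spec_Deal_reward; infer_instance

-- ===== CLAIM (what is proved, stated in full; the proofs are below) =====
def Claim_equal_Deal_reward : Prop := ∀ (gamma : Int) (Reward : List Int), Dom_Deal_reward gamma Reward → Spec_Deal_reward gamma Reward (Deal_reward gamma Reward)

-- ===== LEMMAS AND PROOFS =====

-- first nonzero of a list (0 if none)
def nz : List Int → Int
  | [] => 0
  | v :: t => if v ≠ 0 then v else nz t

-- reference result: each zero replaced by the first nonzero to its right, falling back to s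
def fillW (s : Int) : List Int → List Int
  | [] => []
  | v :: t => (if v ≠ 0 then v else if nz t ≠ 0 then nz t else s) :: fillW s t

theorem nz_concat (t : List Int) (x : Int) :
    nz (t ++ [x]) = if nz t ≠ 0 then nz t else x := by
  induction t with
  | nil =>
    by_cases hx : x = 0
    · subst hx; simp [nz]
    · simp [nz, hx]
  | cons v t ih =>
    by_cases hv : v = 0 <;> simp [nz, hv, ih]

theorem fillW_concat (s x : Int) (l : List Int) :
    fillW s (l ++ [x]) = fillW (if x ≠ 0 then x else s) l ++ [if x ≠ 0 then x else s] := by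
  induction l with
  | nil =>
    by_cases hx : x = 0
    · subst hx; simp [fillW, nz]
    · simp [fillW, hx]
  | cons v t ih =>
    simp only [List.cons_append, fillW, ih, nz_concat]
    by_cases hx : x = 0 <;> by_cases ht : nz t = 0 <;> simp [hx, ht]

theorem dealA_eq (l : List Int) : ∀ (start : Int) (m : List Int),
    dealA start l.length (l ++ m) = fillW start l ++ m := by
  induction l using List.reverseRecOn with
  | nil => intro start m; simp [dealA, fillW]
  | append_singleton l' x ih =>
    intro start m
    have hget : (PySem.List.pyGet? ((l' ++ [x]) ++ m) ((l'.length : Nat) : Int)).getD 0 = x := by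
      rw [List.append_assoc]
      have : PySem.List.pyGet? (l' ++ (x :: m)) ((l'.length : Nat) : Int) = some x :=
        PySem.List.pyGet?_append_length l' m x
      simpa using this
    have hlen : (l' ++ [x]).length = l'.length + 1 := by simp
    rw [hlen]
    show dealA start (l'.length + 1) ((l' ++ [x]) ++ m) = _
    by_cases hx : x = 0
    · subst hx
      by_cases hs : start = 0
      · subst hs
        simp only [dealA, hget]
        rw [if_neg (by simp), if_neg (by simp)]
        rw [List.append_assoc, ih 0 ([0] ++ m), fillW_concat]
        simp
      · simp only [dealA, hget]
        rw [if_neg (by simp), if_pos ⟨hs, trivial⟩]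
        have hset : ((l' ++ [(0:Int)]) ++ m).set l'.length start = l' ++ ([start] ++ m) := by
          rw [List.append_assoc, List.set_append_right _ _ (le_refl l'.length)]
          simp
        rw [hset, ih start ([start] ++ m), fillW_concat]
        simp
    · simp only [dealA, hget]
      rw [if_pos hx]
      rw [List.append_assoc, ih x ([x] ++ m), fillW_concat]
      simp [hx]

theorem bLoop_eq (m : List Int) : ∀ (out : List Int) (z : Nat),
    bLoop out z m = out ++ List.replicate z (nz m) ++ fillW 0 m := by
  induction m with
  | nil => intro out z; simp [bLoop, nz, fillW]
  | cons v t ih =>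
    intro out z
    by_cases hv : v = 0
    · simp only [bLoop, hv, ne_eq, not_true_eq_false, if_false, ih]
      have h1 : nz ((0:Int) :: t) = nz t := by simp [nz]
      have h2 : fillW 0 ((0:Int) :: t) = nz t :: fillW 0 t := by
        by_cases ht : nz t = 0 <;> simp [fillW, ht]
      rw [h1, h2, List.replicate_succ']
      simp
    · simp only [bLoop, if_pos hv, ih]
      have h1 : nz (v :: t) = v := by simp [nz, hv]
      have h2 : fillW 0 (v :: t) = v :: fillW 0 t := by simp [fillW, hv]
      rw [h1, h2]
      simp

-- ===== VERDICT (by name: the statement is the Claim_ definition above) =====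
theorem Deal_reward_spec : Claim_equal_Deal_reward := by
  intro gamma Reward _
  show Deal_reward gamma Reward = Deal_reward_alt gamma Reward
  unfold Deal_reward Deal_reward_alt
  rw [bLoop_eq]
  have := dealA_eq Reward 0 []
  simp only [List.append_nil] at this
  simp [this]
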